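-- pv_equiv track=rewrite | github.com/ThatParticularPencil/IPD_Simulator | IPD_tournament/IPDStrategies.py | Sore_loser
-- ===== SOURCE A (Python) =====
-- def Sore_loser(player, score, modifiers = [None]):
--     if player == 1:
--         player = 0
--         opponent = 1
--     else:
--         player = 1
--         opponent = 0
--     pscore = 0
--     nscore = 0
--     for game in score:
--         if game[player] == 1 and game[opponent]== 1:
--             pscore +=3
--             nscore +=3
--         elif game[player] == 1 and game[opponent]== 0:
--             nscore +=5
--         elif game[player] == 0 and game[opponent]== 1:
--             pscore += 5
--         elif game[player] == 0 and game[opponent]== 0: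
--             pscore +=2
--             nscore +=2
--     if pscore-nscore > 5:
--         return [1]
--     else:
--         return [0]
-- ===== SOURCE B (Python) =====
-- def Sore_loser(player, score, modifiers=[None]):
--     p, o = (0, 1) if player == 1 else (1, 0)
--     # materialise the outcome pairs of games where the player made a legal move,
--     # then compare how often each player was the lone defector
--     outcomes = [(g[p], g[o]) for g in score if g[p] in (0, 1)]
--     return [1] if outcomes.count((0, 1)) > outcomes.count((1, 0)) + 1 else [0]
-- ===== Notes on version B (the rewrite author's own statement) =====
-- stated objective: alternative
-- what changed: Replaces the four-branch 3/5/2 scoring with two running accumulators by a staged computation: materialise the list of outcome pairs and compare the counts of the two lone-defection outcomes (0,1) vs (1,0), which determine the score difference in closed form.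
import Mathlib
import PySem

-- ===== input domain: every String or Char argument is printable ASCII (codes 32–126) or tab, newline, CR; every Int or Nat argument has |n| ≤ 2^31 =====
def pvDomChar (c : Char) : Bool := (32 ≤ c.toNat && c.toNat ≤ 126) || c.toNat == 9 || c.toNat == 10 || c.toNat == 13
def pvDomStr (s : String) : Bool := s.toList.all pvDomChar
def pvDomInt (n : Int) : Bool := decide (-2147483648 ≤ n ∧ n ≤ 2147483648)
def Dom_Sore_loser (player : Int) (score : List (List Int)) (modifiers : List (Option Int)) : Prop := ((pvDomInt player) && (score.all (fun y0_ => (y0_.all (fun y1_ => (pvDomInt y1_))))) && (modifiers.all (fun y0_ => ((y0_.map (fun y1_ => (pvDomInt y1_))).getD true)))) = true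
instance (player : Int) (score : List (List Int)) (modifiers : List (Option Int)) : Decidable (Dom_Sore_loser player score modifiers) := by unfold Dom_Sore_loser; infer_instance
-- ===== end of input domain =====

-- B replaces A's four-branch scoring with two accumulators by a staged computation:
-- build the list of outcome pairs, then compare counts of the two lone-defection
-- outcomes (objective: alternative, same O(n) cost).

-- ===== PORT A =====
-- loop body of A, four-way classification over two accumulators (pscore, nscore)
def pvStepA (p o : Int) (s : Int × Int) (game : List Int) : Int × Int :=
  let gp := PySem.List.pyGetD game p 2   -- default only reached outside Pre_ (IndexError in Python)
  let go := PySem.List.pyGetD game o 2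
  if gp = 1 ∧ go = 1 then (s.1 + 3, s.2 + 3)
  else if gp = 1 ∧ go = 0 then (s.1, s.2 + 5)
  else if gp = 0 ∧ go = 1 then (s.1 + 5, s.2)
  else if gp = 0 ∧ go = 0 then (s.1 + 2, s.2 + 2)
  else s

def Sore_loser (player : Int) (score : List (List Int)) (modifiers : List (Option Int)) : List Int :=
  let p : Int := if player = 1 then 0 else 1
  let o : Int := if player = 1 then 1 else 0
  let r := score.foldl (pvStepA p o) (0, 0)
  if r.1 - r.2 > 5 then [1] else [0]

-- ===== PORT B =====
-- the outcome-pair comprehension of B: [(g[p], g[o]) for g in score if g[p] in (0, 1)]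
def pvOutcomes (p o : Int) (score : List (List Int)) : List (Int × Int) :=
  (score.filter (fun g => PySem.List.pyGetD g p 2 = 0 ∨ PySem.List.pyGetD g p 2 = 1)).map
    (fun g => (PySem.List.pyGetD g p 2, PySem.List.pyGetD g o 2))

def Sore_loser_alt (player : Int) (score : List (List Int)) (modifiers : List (Option Int)) : List Int :=
  let po : Int × Int := if player = 1 then (0, 1) else (1, 0)
  let outcomes := pvOutcomes po.1 po.2 score
  if outcomes.count (0, 1) > outcomes.count (1, 0) + 1 then [1] else [0]

-- ===== PRECONDITION & SPEC =====
-- Pre_ excludes exactly the inputs where Python A raises IndexError: a game row too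
-- short for the player's index, or (when the player's entry is 0/1, so the opponent's
-- entry is read) too short for the opponent's index.
def Pre_Sore_loser (player : Int) (score : List (List Int)) (modifiers : List (Option Int)) : Prop :=
  let p : Int := if player = 1 then 0 else 1
  let o : Int := if player = 1 then 1 else 0
  ∀ g ∈ score, PySem.Raise.InRange g.length p ∧
    ((PySem.List.pyGet? g p = some 0 ∨ PySem.List.pyGet? g p = some 1) → PySem.Raise.InRange g.length o)
instance (player : Int) (score : List (List Int)) (modifiers : List (Option Int)) : Decidable (Pre_Sore_loser player score modifiers) := by unfold Pre_Sore_loser; infer_instance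

def pvWitness_Sore_loser : Int × List (List Int) × List (Option Int) :=
  (1, [[1, 0], [0, 1], [0, 1]], [none])

def Spec_Sore_loser (player : Int) (score : List (List Int)) (modifiers : List (Option Int)) (out : List Int) : Prop := out = Sore_loser_alt player score modifiers
instance (player : Int) (score : List (List Int)) (modifiers : List (Option Int)) (out : List Int) : Decidable (Spec_Sore_loser player score modifiers out) := by unfold Spec_Sore_loser; infer_instance

-- ===== CLAIM (what is proved, stated in full; the proofs are below) =====
def Claim_equal_Sore_loser : Prop := ∀ (player : Int) (score : List (List Int)) (modifiers : List (Option Int)), Dom_Sore_loser player score modifiers → Pre_Sore_loser player score modifiers → Spec_Sore_loser player score modifiers (Sore_loser player score modifiers)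

-- ===== LEMMAS AND PROOFS =====

-- A's accumulated score difference equals 5 × (count of (0,1) − count of (1,0)) over B's outcome list
lemma pvFold_count (p o : Int) : ∀ (gs : List (List Int)) (s : Int × Int),
    (gs.foldl (pvStepA p o) s).1 - (gs.foldl (pvStepA p o) s).2 =
      s.1 - s.2 + 5 * (((pvOutcomes p o gs).count (0, 1) : Int) - ((pvOutcomes p o gs).count (1, 0) : Int)) := by
  intro gs
  induction gs with
  | nil => intro s; simp [pvOutcomes]
  | cons g gs ih =>
      intro s
      simp only [List.foldl_cons]
      rw [ih]
      unfold pvOutcomes pvStepA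
      simp only [List.filter_cons]
      by_cases hv : (PySem.List.pyGetD g p 2 = 0 ∨ PySem.List.pyGetD g p 2 = 1)
      · simp only [hv, decide_true, if_pos, List.map_cons, List.count_cons]
        show _ = _
        rcases hv with h0 | h1
        · by_cases hgo0 : PySem.List.pyGetD g o 2 = 0
          · simp [h0, hgo0, Prod.ext_iff]
          · by_cases hgo1 : PySem.List.pyGetD g o 2 = 1
            · simp [h0, hgo1, Prod.ext_iff]; ring
            · simp [h0, hgo0, hgo1, Prod.ext_iff]
        · by_cases hgo0 : PySem.List.pyGetD g o 2 = 0
          · simp [h1, hgo0, Prod.ext_iff]; ring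
          · by_cases hgo1 : PySem.List.pyGetD g o 2 = 1
            · simp [h1, hgo1, Prod.ext_iff]
            · simp [h1, hgo0, hgo1, Prod.ext_iff]
      · have h0 : ¬ PySem.List.pyGetD g p 2 = 0 := fun h => hv (Or.inl h)
        have h1 : ¬ PySem.List.pyGetD g p 2 = 1 := fun h => hv (Or.inr h)
        simp [h0, h1]

-- ===== VERDICT (by name: the statement is the Claim_ definition above) =====
theorem Sore_loser_spec : Claim_equal_Sore_loser := by
  intro player score modifiers _ _
  unfold Spec_Sore_loser Sore_loser Sore_loser_alt
  by_cases hp : player = 1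
  · have h := pvFold_count 0 1 score (0, 0)
    simp only [hp, reduceIte] at *

    split_ifs with h1 h2 <;> first | rfl | (exfalso; omega)
  · have h := pvFold_count 1 0 score (0, 0)
    simp only [hp, reduceIte] at *

    split_ifs with h1 h2 <;> first | rfl | (exfalso; omega)
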